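-- pv_equiv track=rewrite | github.com/verba-neo/multi-it-ai-2 | p121684-체육대회/이용희.py | solution
-- ===== SOURCE A (Python) =====
-- from itertools import permutations
--
-- def solution(ability):
--     answer = 0
--     for permutations_ability in permutations(ability, len(ability[0])):
--         idx = 0
--         sum_value = 0
--         for per_ability in permutations_ability:
--             sum_value += per_ability[idx]
--             idx += 1
--         if sum_value > answer:
--             answer = sum_value
--     return answer
-- ===== SOURCE B (Python) =====
-- def solution(ability):
--     # Bitmask DP over the set of events already filled, scanning rows
--     # back-to-front (row order is irrelevant to the assignment optimum).
--     k = len(ability[0])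
--     size = 1 << k
--     dp = [None] * size          # dp[m]: best sum filling exactly the events in m
--     dp[0] = 0
--     for row in reversed(ability):
--         ndp = dp[:]             # the row may also be left unused
--         for m in range(size):
--             base = dp[m]
--             if base is None:
--                 continue
--             for e in range(k):
--                 if not (m >> e) & 1:
--                     nm = m | (1 << e)
--                     cand = base + row[e]
--                     cur = ndp[nm]
--                     if cur is None or cand > cur:
--                         ndp[nm] = cand
--         dp = ndp
--     best = dp[size - 1]
--     if best is None:
--         return 0
--     return best if best > 0 else 0
-- ===== Notes on version B (the rewrite author's own statement) =====
-- stated objective: faster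
-- what changed: Replaced brute-force enumeration of all k-permutations of rows (itertools.permutations) by a bitmask dynamic program over the set of filled events, scanning the rows once.
-- outside the precondition, e.g. on solution([[1, 2, 3], [4]]): A returns 0, B raises IndexError; on solution([]): A raises IndexError, B raises IndexError
import Mathlib
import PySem

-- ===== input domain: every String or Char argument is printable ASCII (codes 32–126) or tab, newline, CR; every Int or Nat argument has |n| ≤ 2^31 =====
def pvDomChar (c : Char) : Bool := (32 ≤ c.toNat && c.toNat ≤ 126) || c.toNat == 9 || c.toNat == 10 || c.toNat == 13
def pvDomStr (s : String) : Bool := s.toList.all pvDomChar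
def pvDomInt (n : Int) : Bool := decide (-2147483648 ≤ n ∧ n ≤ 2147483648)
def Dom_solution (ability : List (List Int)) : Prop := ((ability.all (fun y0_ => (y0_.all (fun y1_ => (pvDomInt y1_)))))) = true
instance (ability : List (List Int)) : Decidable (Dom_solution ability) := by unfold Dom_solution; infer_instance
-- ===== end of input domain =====

-- B replaces A's enumeration of all k-permutations of rows by a bitmask DP over the
-- set of filled events (objective: faster, asymptotic).

-- row[i] for a nonnegative index i (both Pythons read rows only at indices 0..k-1)
def pvVal (row : List Int) (e : Nat) : Int := (PySem.List.pyGet? row (e : Int)).getD 0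

-- ===== PORT A =====
-- picks xs = [(xs[i], xs without position i)] in index order; permsA r xs enumerates
-- itertools.permutations(xs, r) in the same lexicographic index order.
def picks {α : Type} : List α → List (α × List α)
  | [] => []
  | x :: xs => (x, xs) :: (picks xs).map (fun p => (p.1, x :: p.2))

def permsA (r : Nat) (xs : List (List Int)) : List (List (List Int)) :=
  match r with
  | 0 => [[]]
  | r + 1 => (picks xs).flatMap (fun p => (permsA r p.2).map (fun q => p.1 :: q))

-- len(ability[0]) raises IndexError on []; Pre_ excludes the empty list (headI is the total surrogate)
def solution (ability : List (List Int)) : Int :=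
  (permsA (ability.headI).length ability).foldl
    (fun answer p =>
      let st := p.foldl (fun (st : Nat × Int) row => (st.1 + 1, st.2 + pvVal row st.1)) (0, 0)
      if st.2 > answer then st.2 else answer) 0

-- ===== PORT B =====
-- dp cell update: ndp[nm] = cand if empty or improved (Source B's inner if)
def pvUpdMax (ndp : List (Option Int)) (nm : Nat) (cand : Int) : List (Option Int) :=
  match ndp.getD nm none with
  | none => ndp.set nm (some cand)
  | some cur => if cand > cur then ndp.set nm (some cand) else ndp

-- one row of Source B's DP: the m/e double loop, reading old dp, writing ndp (initially dp[:])
def pvStepRow (k : Nat) (dp : List (Option Int)) (row : List Int) : List (Option Int) :=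
  (List.range (2 ^ k)).foldl (fun ndp m =>
    match dp.getD m none with
    | none => ndp
    | some base =>
      (List.range k).foldl (fun ndp e =>
        if (m >>> e) % 2 = 0 then
          pvUpdMax ndp (m ||| (1 <<< e)) (base + pvVal row e)
        else ndp) ndp) dp

def solution_alt (ability : List (List Int)) : Int :=
  let k := (ability.headI).length
  let dp0 : List (Option Int) := (List.range (2 ^ k)).map (fun m => if m = 0 then some 0 else none)
  let dp := (ability.reverse).foldl (pvStepRow k) dp0
  match dp.getD (2 ^ k - 1) none with
  | none => 0
  | some best => if best > 0 then best else 0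

-- ===== PRECONDITION & SPEC =====
-- Pre_ excludes the empty list (A raises IndexError on len(ability[0])) and ragged inputs
-- with a row shorter than the first row: there A raises IndexError whenever such a row is
-- reached (and in the n < k corner A returns 0 while B's row scan raises).
def Pre_solution (ability : List (List Int)) : Prop :=
  ability ≠ [] ∧ ∀ row ∈ ability, (ability.headI).length ≤ row.length
instance (ability : List (List Int)) : Decidable (Pre_solution ability) := by
  unfold Pre_solution; infer_instance

def pvWitness_solution : List (List Int) := [[1, 2], [3, 4], [5, 6]]

def Spec_solution (ability : List (List Int)) (out : Int) : Prop := out = solution_alt ability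
instance (ability : List (List Int)) (out : Int) : Decidable (Spec_solution ability out) := by
  unfold Spec_solution; infer_instance

-- ===== CLAIM (what is proved, stated in full; the proofs are below) =====
def Claim_equal_solution : Prop := ∀ (ability : List (List Int)), Dom_solution ability → Pre_solution ability → Spec_solution ability (solution ability)

-- ===== LEMMAS AND PROOFS =====

-- Option Int as a max-semilattice with -∞ (= none)
def omax : Option Int → Option Int → Option Int
  | none, b => b
  | some x, none => some x
  | some x, some y => some (max x y)

def oadd (c : Int) (o : Option Int) : Option Int := o.map (fun x => x + c)

def listOmax (l : List (Option Int)) : Option Int := l.foldl omax none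

-- best total assignment of the events es to distinct rows of R, event-major (A's search order)
def Hbest : List Nat → List (List Int) → Option Int
  | [], _ => some 0
  | e :: es, R => listOmax ((picks R).map (fun p => oadd (pvVal p.1 e) (Hbest es p.2)))

-- the same optimum, row-major with a skip branch (B's DP recurrence)
def Gbest : List (List Int) → List Nat → Option Int
  | [], es => if es.isEmpty then some 0 else none
  | r :: R, es =>
    omax (Gbest R es) (listOmax ((picks es).map (fun p => oadd (pvVal r p.1) (Gbest R p.2))))

def sumZip (p : List (List Int)) (es : List Nat) : Int :=
  (p.zip es).foldl (fun s q => s + pvVal q.1 q.2) 0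

def evs (k m : Nat) : List Nat := (List.range k).filter (fun e => m.testBit e)

theorem omax_none_right (a : Option Int) : omax a none = a := by cases a <;> rfl

theorem omax_none_left (a : Option Int) : omax none a = a := rfl

theorem omax_comm (a b : Option Int) : omax a b = omax b a := by
  cases a <;> cases b <;> simp [omax, max_comm]

theorem omax_assoc (a b c : Option Int) : omax (omax a b) c = omax a (omax b c) := by
  cases a <;> cases b <;> cases c <;> simp [omax, max_assoc]

theorem omax_left_comm (a b c : Option Int) : omax a (omax b c) = omax b (omax a c) := by
  rw [← omax_assoc, omax_comm a b, omax_assoc]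

theorem oadd_omax (c : Int) (a b : Option Int) :
    oadd c (omax a b) = omax (oadd c a) (oadd c b) := by
  cases a <;> cases b <;> simp [omax, oadd]

theorem oadd_oadd_comm (c d : Int) (o : Option Int) :
    oadd c (oadd d o) = oadd d (oadd c o) := by
  cases o <;> simp [oadd]; omega

theorem foldl_omax_eq (l : List (Option Int)) (a : Option Int) :
    l.foldl omax a = omax a (listOmax l) := by
  induction l generalizing a with
  | nil => simp [listOmax, List.foldl, omax_none_right]
  | cons x l ih =>
    simp only [listOmax, List.foldl] at *
    rw [ih (omax a x), ih (omax none x)]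
    rw [show omax none x = x from rfl, omax_assoc]

theorem listOmax_cons (x : Option Int) (l : List (Option Int)) :
    listOmax (x :: l) = omax x (listOmax l) := by
  simp only [listOmax, List.foldl]
  rw [foldl_omax_eq]; rfl

theorem listOmax_append (l₁ l₂ : List (Option Int)) :
    listOmax (l₁ ++ l₂) = omax (listOmax l₁) (listOmax l₂) := by
  induction l₁ with
  | nil => simp [listOmax, omax_none_left]
  | cons x l ih => simp [listOmax_cons, ih, omax_assoc]

theorem listOmax_flatMap {α : Type} (l : List α) (f : α → List (Option Int)) :
    listOmax (l.flatMap f) = listOmax (l.map (fun x => listOmax (f x))) := by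
  induction l with
  | nil => rfl
  | cons x l ih => simp [List.flatMap_cons, listOmax_append, listOmax_cons, ih]

theorem oadd_listOmax (c : Int) (l : List (Option Int)) :
    oadd c (listOmax l) = listOmax (l.map (oadd c)) := by
  induction l with
  | nil => rfl
  | cons x l ih => simp [listOmax_cons, oadd_omax, ih]

theorem listOmax_map_omax {α : Type} (l : List α) (f g : α → Option Int) :
    listOmax (l.map (fun x => omax (f x) (g x))) =
      omax (listOmax (l.map f)) (listOmax (l.map g)) := by
  induction l with
  | nil => rfl
  | cons x l ih =>
    simp only [List.map_cons, listOmax_cons, ih]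
    rw [omax_assoc, omax_assoc]
    congr 1
    rw [← omax_assoc, omax_comm (g x), omax_assoc]

theorem listOmax_all_none {α : Type} (l : List α) (f : α → Option Int)
    (h : ∀ x ∈ l, f x = none) : listOmax (l.map f) = none := by
  induction l with
  | nil => rfl
  | cons x l ih =>
    simp only [List.map_cons, listOmax_cons]
    rw [h x (by simp), ih (fun y hy => h y (by simp [hy]))]
    rfl

theorem listOmax_swap {α β : Type} (l : List α) (m : List β) (f : α → β → Option Int) :
    listOmax (l.map (fun a => listOmax (m.map (f a)))) =
      listOmax (m.map (fun b => listOmax (l.map (fun a => f a b)))) := by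
  induction l with
  | nil =>
    simp only [List.map_nil]
    rw [show listOmax ([] : List (Option Int)) = none from rfl,
      listOmax_all_none m _ (fun x _ => rfl)]
  | cons x l ih =>
    simp only [List.map_cons, listOmax_cons, ih]
    rw [← listOmax_map_omax]

theorem listOmax_filter {α : Type} (l : List α) (p : α → Bool) (f : α → Option Int) :
    listOmax (l.map (fun x => if p x then f x else none)) =
      listOmax ((l.filter p).map f) := by
  induction l with
  | nil => rfl
  | cons x l ih =>
    by_cases h : p x
    · simp [List.filter_cons, h, listOmax_cons, ih]
    · simp [List.filter_cons, h, listOmax_cons, ih, omax_none_left]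

-- ---------- picks ----------
theorem picks_eq_map_erase (es : List Nat) (h : es.Nodup) :
    picks es = es.map (fun e => (e, es.erase e)) := by
  induction es with
  | nil => rfl
  | cons x xs ih =>
    have hx : x ∉ xs := (List.nodup_cons.mp h).1
    rw [picks, ih (List.nodup_cons.mp h).2, List.map_map, List.map_cons,
      List.erase_cons_head]
    congr 1
    refine List.map_congr_left (fun e he => ?_)
    have hne : ¬ (x == e) = true := by
      simp only [beq_iff_eq]
      exact fun hh => hx (hh ▸ he)
    simp [Function.comp, List.erase_cons_tail hne]

-- ---------- exchange: Hbest = Gbest ----------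
theorem Gbest_nil_events (R : List (List Int)) : Gbest R [] = some 0 := by
  induction R with
  | nil => rfl
  | cons r R ih => simp [Gbest, picks, ih, listOmax, omax]

theorem peel_double (R : List (List Int)) (es : List Nat) (r : List Int) (e : Nat) :
    listOmax ((picks es).map (fun q => oadd (pvVal r q.1)
        (listOmax ((picks R).map (fun p => oadd (pvVal p.1 e) (Gbest p.2 q.2)))))) =
      listOmax ((picks R).map (fun p => oadd (pvVal p.1 e)
        (listOmax ((picks es).map (fun q => oadd (pvVal r q.1) (Gbest p.2 q.2)))))) := by
  simp only [oadd_listOmax, List.map_map, Function.comp_def]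
  rw [listOmax_swap]
  congr 1
  refine List.map_congr_left (fun p _ => ?_)
  congr 1
  refine List.map_congr_left (fun q _ => ?_)
  exact oadd_oadd_comm _ _ _

theorem Gbest_peel (R : List (List Int)) (e : Nat) (es : List Nat) :
    Gbest R (e :: es) =
      listOmax ((picks R).map (fun p => oadd (pvVal p.1 e) (Gbest p.2 es))) := by
  induction R generalizing e es with
  | nil => simp [Gbest, picks, listOmax]
  | cons r R ih =>
    simp only [Gbest, picks, List.map_cons, List.map_map, listOmax_cons, ih]
    simp only [Function.comp_def, ih, Gbest]
    simp only [oadd_omax, listOmax_map_omax]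
    rw [peel_double R es r e, omax_left_comm]

theorem Hbest_eq_Gbest (es : List Nat) (R : List (List Int)) :
    Hbest es R = Gbest R es := by
  induction es generalizing R with
  | nil => simp [Hbest, Gbest_nil_events]
  | cons e es ih =>
    rw [Hbest, Gbest_peel]
    congr 1
    exact List.map_congr_left (fun p _ => by rw [ih])

-- ---------- A-side fusion ----------
theorem foldl_add_init (l : List (List Int × Nat)) (s : Int) :
    (l.foldl (fun s q => s + pvVal q.1 q.2) s) =
      s + l.foldl (fun s q => s + pvVal q.1 q.2) 0 := by
  induction l generalizing s with
  | nil => simp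
  | cons q l ih =>
    simp only [List.foldl]
    rw [ih (s + pvVal q.1 q.2), ih (0 + pvVal q.1 q.2)]
    omega

theorem sumZip_cons (r : List Int) (p : List (List Int)) (e : Nat) (es : List Nat) :
    sumZip (r :: p) (e :: es) = sumZip p es + pvVal r e := by
  simp only [sumZip, List.zip_cons_cons, List.foldl]
  rw [foldl_add_init]
  omega

theorem permsA_mem_length (r : Nat) (xs : List (List Int)) (p : List (List Int))
    (h : p ∈ permsA r xs) : p.length = r := by
  induction r generalizing xs p with
  | zero => simp [permsA] at h; simp [h]
  | succ r ih =>
    simp only [permsA, List.mem_flatMap, List.mem_map] at h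
    obtain ⟨q, _, p', hp', rfl⟩ := h
    simp [ih _ _ hp']

theorem fusion (es : List Nat) (R : List (List Int)) :
    Hbest es R = listOmax ((permsA es.length R).map (fun p => some (sumZip p es))) := by
  induction es generalizing R with
  | nil => simp [Hbest, permsA, listOmax, sumZip, omax]
  | cons e es ih =>
    simp only [Hbest, List.length_cons, permsA]
    rw [List.map_flatMap, listOmax_flatMap]
    congr 1
    refine List.map_congr_left (fun p _ => ?_)
    rw [ih, oadd_listOmax]
    simp only [List.map_map]
    congr 1
    refine List.map_congr_left (fun q _ => ?_)
    simp [Function.comp, oadd, sumZip_cons]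

-- ---------- A's folds ----------
def oget (a : Int) : Option Int → Int
  | none => a
  | some v => max a v

theorem maxFold {α : Type} (l : List α) (f : α → Int) (a : Int) :
    l.foldl (fun acc p => if f p > acc then f p else acc) a =
      oget a (listOmax (l.map (fun p => some (f p)))) := by
  induction l generalizing a with
  | nil => rfl
  | cons x l ih =>
    simp only [List.foldl, List.map_cons, listOmax_cons]
    rw [ih]
    have h1 : (if f x > a then f x else a) = max a (f x) := by
      rw [max_def]; split_ifs <;> omega
    rw [h1]
    cases hl : listOmax (l.map fun p => some (f p)) with
    | none => simp [oget, omax_none_right, omax]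
    | some v => simp [oget, omax, max_assoc]

theorem idxFold (p : List (List Int)) (i : Nat) (s : Int) :
    p.foldl (fun (st : Nat × Int) row => (st.1 + 1, st.2 + pvVal row st.1)) (i, s) =
      (i + p.length, s + sumZip p (List.range' i p.length)) := by
  induction p generalizing i s with
  | nil => simp [sumZip]
  | cons r p ih =>
    simp only [List.foldl_cons, List.length_cons, List.range'_succ]
    rw [ih, Prod.mk.injEq]
    refine ⟨by omega, ?_⟩
    rw [sumZip_cons]
    omega

-- ---------- bit lemmas ----------
theorem testBit_false_of_ge (m k i : Nat) (hm : m < 2 ^ k) (hi : k ≤ i) :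
    m.testBit i = false := by
  exact Nat.testBit_lt_two_pow (lt_of_lt_of_le hm (Nat.pow_le_pow_right (by norm_num) hi))

theorem lt_two_pow_of_testBit (m k : Nat) (h : ∀ i, k ≤ i → m.testBit i = false) :
    m < 2 ^ k := by
  have hm : m = m % 2 ^ k := by
    refine Nat.eq_of_testBit_eq (fun i => ?_)
    rw [Nat.testBit_mod_two_pow]
    by_cases hi : i < k
    · simp [hi]
    · simp [hi, h i (by omega)]
  rw [hm]
  exact Nat.mod_lt _ (Nat.two_pow_pos k)

theorem evs_nodup (k m : Nat) : (evs k m).Nodup := (List.nodup_range).filter _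

theorem evs_nil_iff (k m : Nat) (hm : m < 2 ^ k) : evs k m = [] ↔ m = 0 := by
  constructor
  · intro h
    refine Nat.eq_of_testBit_eq (fun i => ?_)
    simp only [Nat.zero_testBit]
    by_cases hi : i < k
    · have := List.filter_eq_nil_iff.mp h i (List.mem_range.mpr hi)
      simpa using this
    · exact testBit_false_of_ge m k i hm (by omega)
  · rintro rfl
    simp [evs, Nat.zero_testBit]

theorem evs_full (k : Nat) : evs k (2 ^ k - 1) = List.range k := by
  unfold evs
  rw [List.filter_eq_self]
  intro e he
  simp [Nat.testBit_two_pow_sub_one, List.mem_range.mp he]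

theorem evs_erase (k j e : Nat) (he : j.testBit e = true) :
    (evs k j).erase e = evs k (j ^^^ (1 <<< e)) := by
  rw [List.Nodup.erase_eq_filter (evs_nodup k j), evs, List.filter_filter, evs]
  refine List.filter_congr (fun x hx => ?_)
  rw [Nat.testBit_xor, Nat.one_shiftLeft, Nat.testBit_two_pow]
  by_cases hxe : x = e
  · subst hxe; simp [he]
  · have hex : ¬ (e = x) := fun h => hxe h.symm
    simp [hxe, hex]

theorem mem_evs (k j e : Nat) : e ∈ evs k j ↔ e < k ∧ j.testBit e = true := by
  simp [evs, List.mem_filter, List.mem_range]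

theorem xor_bit_lt (k j e : Nat) (hj : j < 2 ^ k) (he : j.testBit e = true) :
    j ^^^ (1 <<< e) < 2 ^ k := by
  refine lt_two_pow_of_testBit _ _ (fun i hi => ?_)
  rw [Nat.one_shiftLeft, Nat.testBit_xor, testBit_false_of_ge j k i hj hi,
    Nat.testBit_two_pow]
  have : e < k := by
    by_contra hc
    rw [testBit_false_of_ge j k e hj (by omega)] at he
    exact absurd he (by simp)
  simp; omega

theorem bit_unique (j e m : Nat) :
    (m.testBit e = false ∧ m ||| (1 <<< e) = j) ↔
      (j.testBit e = true ∧ m = j ^^^ (1 <<< e)) := by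
  rw [Nat.one_shiftLeft]
  constructor
  · rintro ⟨hme, rfl⟩
    refine ⟨by simp [Nat.testBit_or, Nat.testBit_two_pow], ?_⟩
    refine Nat.eq_of_testBit_eq (fun i => ?_)
    rw [Nat.testBit_xor, Nat.testBit_or, Nat.testBit_two_pow]
    by_cases hie : e = i
    · subst hie; simp [hme]
    · simp [hie]
  · rintro ⟨hje, rfl⟩
    refine ⟨by rw [Nat.testBit_xor, Nat.testBit_two_pow]; simp [hje], ?_⟩
    refine Nat.eq_of_testBit_eq (fun i => ?_)
    rw [Nat.testBit_or, Nat.testBit_xor, Nat.testBit_two_pow]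
    by_cases hie : e = i
    · subst hie; simp [hje]
    · simp [hie]

theorem mod2_testBit (m e : Nat) : (m >>> e) % 2 = 0 ↔ m.testBit e = false := by
  rw [Nat.testBit_eq_decide_div_mod_eq, Nat.shiftRight_eq_div_pow]
  constructor
  · intro h; simp; omega
  · intro h; simp at h; omega

theorem or_bit_lt (k m e : Nat) (hm : m < 2 ^ k) (he : e < k) : m ||| (1 <<< e) < 2 ^ k := by
  refine lt_two_pow_of_testBit _ _ (fun i hi => ?_)
  rw [Nat.testBit_or, testBit_false_of_ge m k i hm hi, Nat.one_shiftLeft,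
    Nat.testBit_two_pow]
  simp; omega

theorem foldl_fixed {α β : Type} (l : List α) (g : β → α → β) (a : β)
    (h : ∀ b x, x ∈ l → g b x = b) : l.foldl g a = a := by
  induction l generalizing a with
  | nil => rfl
  | cons x l ih => rw [List.foldl_cons, h a x (by simp), ih _ (fun b y hy => h b y (by simp [hy]))]

theorem foldl_len {α : Type} (l : List α) (g : List (Option Int) → α → List (Option Int))
    (h : ∀ nd x, (g nd x).length = nd.length) (ndp : List (Option Int)) :
    (l.foldl g ndp).length = ndp.length := by
  induction l generalizing ndp with
  | nil => rfl
  | cons x l ih => rw [List.foldl_cons, ih, h]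

theorem listOmax_range_single (N m₀ : Nat) (v : Nat → Option Int) (h : m₀ < N) :
    listOmax ((List.range N).map (fun m => if m = m₀ then v m else none)) = v m₀ := by
  induction N with
  | zero => omega
  | succ N ih =>
    rw [List.range_succ, List.map_append, listOmax_append]
    by_cases hm : m₀ = N
    · subst hm
      rw [listOmax_all_none _ _ (fun x hx => by
        rw [if_neg]; exact fun hh => by simp at hx; omega)]
      simp [listOmax_cons, listOmax, omax_none_left, omax_none_right]
    · rw [ih (by omega)]
      have : ¬ (N = m₀) := fun hh => hm hh.symm
      simp [this, listOmax_cons, listOmax, omax_none_right]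

-- ---------- DP pointwise ----------
def oupd (cur : Option Int) (cand : Int) : Option Int :=
  match cur with
  | none => some cand
  | some v => if cand > v then some cand else some v

theorem oupd_eq_omax (cur : Option Int) (cand : Int) :
    oupd cur cand = omax cur (some cand) := by
  cases cur with
  | none => rfl
  | some v => simp only [oupd, omax, max_def]; split_ifs <;> simp <;> omega

theorem updMax_length (ndp : List (Option Int)) (nm : Nat) (c : Int) :
    (pvUpdMax ndp nm c).length = ndp.length := by
  unfold pvUpdMax
  cases ndp.getD nm none <;> simp <;> split_ifs <;> simp

theorem getD_set_self (l : List (Option Int)) (i : Nat) (v : Option Int) (h : i < l.length) :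
    (l.set i v).getD i none = v := by
  simp [List.getD_eq_getElem?_getD, List.getElem?_set, h]

theorem getD_set_ne (l : List (Option Int)) (i j : Nat) (v : Option Int) (h : i ≠ j) :
    (l.set i v).getD j none = l.getD j none := by
  simp [List.getD_eq_getElem?_getD, List.getElem?_set, h]

theorem updMax_getD_self (ndp : List (Option Int)) (nm : Nat) (c : Int) (h : nm < ndp.length) :
    (pvUpdMax ndp nm c).getD nm none = oupd (ndp.getD nm none) c := by
  unfold pvUpdMax oupd
  cases hc : ndp.getD nm none with
  | none => exact getD_set_self ndp nm (some c) h
  | some v =>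
    show (if c > v then ndp.set nm (some c) else ndp).getD nm none
      = if c > v then some c else some v
    by_cases hcv : c > v
    · rw [if_pos hcv, if_pos hcv]; exact getD_set_self ndp nm (some c) h
    · rw [if_neg hcv, if_neg hcv]; exact hc

theorem updMax_getD_ne (ndp : List (Option Int)) (nm j : Nat) (c : Int) (h : nm ≠ j) :
    (pvUpdMax ndp nm c).getD j none = ndp.getD j none := by
  unfold pvUpdMax
  cases ndp.getD nm none with
  | none => exact getD_set_ne ndp nm j (some c) h
  | some v =>
    show (if c > v then ndp.set nm (some c) else ndp).getD j none = ndp.getD j none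
    split_ifs
    · exact getD_set_ne ndp nm j (some c) h
    · rfl

-- generic fold of guarded pvUpdMax updates, read pointwise
theorem updFold_getD {α : Type} (l : List α) (P : α → Prop) [DecidablePred P]
    (t : α → Nat) (c : α → Int) (ndp : List (Option Int)) (j : Nat)
    (ht : ∀ x ∈ l, P x → t x < ndp.length) :
    (l.foldl (fun nd x => if P x then pvUpdMax nd (t x) (c x) else nd) ndp).getD j none =
      omax (ndp.getD j none)
        (listOmax (l.map (fun x => if P x ∧ t x = j then some (c x) else none))) := by
  induction l generalizing ndp with
  | nil => simp [listOmax, omax_none_right]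
  | cons x l ih =>
    simp only [List.foldl, List.map_cons, listOmax_cons]
    by_cases hP : P x
    · rw [if_pos hP]
      rw [ih _ (fun y hy hPy => by rw [updMax_length]; exact ht y (by simp [hy]) hPy)]
      by_cases hj : t x = j
      · subst hj
        rw [updMax_getD_self _ _ _ (ht x (by simp) hP), oupd_eq_omax,
          if_pos ⟨hP, rfl⟩, omax_assoc]
      · rw [updMax_getD_ne _ _ _ _ hj, if_neg (by tauto)]
        rfl
    · rw [if_neg hP, ih _ (fun y hy hPy => ht y (by simp [hy]) hPy),
        if_neg (by tauto)]
      rfl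

-- the per-row DP transition, pointwise
theorem stepRow_getD (k : Nat) (dp : List (Option Int)) (row : List Int)
    (hlen : dp.length = 2 ^ k) (j : Nat) (hj : j < 2 ^ k) :
    (pvStepRow k dp row).getD j none =
      omax (dp.getD j none)
        (listOmax ((evs k j).map (fun e =>
          oadd (pvVal row e) (dp.getD (j ^^^ (1 <<< e)) none)))) := by
  have hpairs : pvStepRow k dp row =
      ((List.range (2 ^ k)).flatMap (fun m => (List.range k).map (fun e => (m, e)))).foldl
        (fun nd x =>
          if ((dp.getD x.1 none).isSome = true ∧ (x.1 >>> x.2) % 2 = 0) then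
            pvUpdMax nd (x.1 ||| (1 <<< x.2)) ((dp.getD x.1 none).getD 0 + pvVal row x.2)
          else nd) dp := by
    rw [List.foldl_flatMap]
    unfold pvStepRow
    congr 1
    funext nd m
    cases hdm : dp.getD m none with
    | none =>
      rw [List.foldl_map]
      refine (foldl_fixed _ _ _ (fun b e _ => ?_)).symm
      rw [if_neg]
      rintro ⟨h1, -⟩
      rw [hdm] at h1
      simp at h1
    | some base =>
      rw [List.foldl_map]
      show List.foldl (fun ndp e => if (m >>> e) % 2 = 0 then
        pvUpdMax ndp (m ||| (1 <<< e)) (base + pvVal row e) else ndp) nd (List.range k) = _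
      congr 1
      funext nd' e
      rw [hdm]
      simp
  have ht : ∀ x ∈ (List.range (2 ^ k)).flatMap (fun m => (List.range k).map (fun e => (m, e))),
      ((dp.getD x.1 none).isSome = true ∧ (x.1 >>> x.2) % 2 = 0) →
      (x.1 ||| (1 <<< x.2)) < dp.length := by
    intro x hx _
    simp only [List.mem_flatMap, List.mem_map, List.mem_range] at hx
    obtain ⟨m, hm, e, he, rfl⟩ := hx
    rw [hlen]
    exact or_bit_lt k m e hm he
  rw [hpairs, updFold_getD _ _ _ _ dp j ht]
  congr 1
  rw [List.map_flatMap]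
  simp only [List.map_map, Function.comp_def]
  rw [listOmax_flatMap, listOmax_swap]
  conv_rhs => rw [evs]
  rw [← listOmax_filter]
  refine congrArg listOmax (List.map_congr_left (fun e he => ?_))
  by_cases hte : j.testBit e = true
  · rw [if_pos hte]
    have hcong : ∀ m,
        (if ((dp.getD m none).isSome = true ∧ (m >>> e) % 2 = 0) ∧ m ||| (1 <<< e) = j
          then some ((dp.getD m none).getD 0 + pvVal row e) else none)
        = (if m = j ^^^ (1 <<< e) then
            (if (dp.getD m none).isSome = true
              then some ((dp.getD m none).getD 0 + pvVal row e) else none) else none) := by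
      intro m
      by_cases hm : m = j ^^^ (1 <<< e)
      · subst hm
        have hb := (bit_unique j e (j ^^^ (1 <<< e))).mpr ⟨hte, rfl⟩
        by_cases hs : (dp.getD (j ^^^ (1 <<< e)) none).isSome = true
        · rw [if_pos ⟨⟨hs, (mod2_testBit _ _).mpr hb.1⟩, hb.2⟩, if_pos rfl, if_pos hs]
        · rw [if_neg (by tauto), if_pos rfl, if_neg hs]
      · rw [if_neg, if_neg hm]
        rintro ⟨⟨_, hm2⟩, hm3⟩
        exact hm ((bit_unique j e m).mp ⟨(mod2_testBit _ _).mp hm2, hm3⟩).2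
    rw [List.map_congr_left (fun m _ => hcong m),
      listOmax_range_single _ _ _ (xor_bit_lt k j e hj hte)]
    cases hdd : dp.getD (j ^^^ (1 <<< e)) none with
    | none => simp [hdd, oadd]
    | some b => simp [hdd, oadd]
  · rw [if_neg hte]
    refine listOmax_all_none _ _ (fun m _ => ?_)
    rw [if_neg]
    rintro ⟨⟨_, hm2⟩, hm3⟩
    exact hte ((bit_unique j e m).mp ⟨(mod2_testBit _ _).mp hm2, hm3⟩).1

theorem stepRow_length (k : Nat) (dp : List (Option Int)) (row : List Int) :
    (pvStepRow k dp row).length = dp.length := by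
  unfold pvStepRow
  refine foldl_len _ _ (fun nd m => ?_) dp
  cases dp.getD m none with
  | none => rfl
  | some base =>
    refine foldl_len _ _ (fun nd' e => ?_) nd
    by_cases hc : (m >>> e) % 2 = 0
    · rw [if_pos hc, updMax_length]
    · rw [if_neg hc]

-- ---------- DP invariant ----------
theorem dp_invariant (k : Nat) (R : List (List Int)) :
    (R.foldr (fun row dp => pvStepRow k dp row)
        ((List.range (2 ^ k)).map (fun m => if m = 0 then some 0 else none))).length = 2 ^ k ∧
    ∀ j < 2 ^ k,
      (R.foldr (fun row dp => pvStepRow k dp row)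
        ((List.range (2 ^ k)).map (fun m => if m = 0 then some 0 else none))).getD j none =
        Gbest R (evs k j) := by
  induction R with
  | nil =>
    refine ⟨by simp, fun j hj => ?_⟩
    rw [List.foldr_nil, List.getD_eq_getElem?_getD, List.getElem?_map,
      List.getElem?_range hj]
    simp only [Option.map_some, Option.getD_some]
    by_cases hz : j = 0
    · subst hz
      simp [Gbest, (evs_nil_iff k 0 hj).mpr rfl]
    · have hne : evs k j ≠ [] := fun h => hz ((evs_nil_iff k j hj).mp h)
      simp [Gbest, hz, hne]
  | cons r R ih =>
    refine ⟨by rw [List.foldr_cons, stepRow_length]; exact ih.1, fun j hj => ?_⟩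
    rw [List.foldr_cons, stepRow_getD k _ r ih.1 j hj]
    rw [show Gbest (r :: R) (evs k j) = omax (Gbest R (evs k j))
      (listOmax ((picks (evs k j)).map (fun p => oadd (pvVal r p.1) (Gbest R p.2)))) from rfl]
    congr 1
    · exact ih.2 j hj
    · rw [picks_eq_map_erase _ (evs_nodup k j), List.map_map]
      refine congrArg listOmax (List.map_congr_left (fun e he => ?_))
      have hte := ((mem_evs k j e).mp he).2
      simp only [Function.comp_def]
      rw [evs_erase k j e hte, ih.2 (j ^^^ (1 <<< e)) (xor_bit_lt k j e hj hte)]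

-- ---------- assembly ----------
theorem solution_eq (ability : List (List Int)) :
    solution ability = solution_alt ability := by
  have hA : solution ability =
      oget 0 (listOmax ((permsA (ability.headI).length ability).map
        (fun p => some ((p.foldl (fun (st : Nat × Int) row =>
          (st.1 + 1, st.2 + pvVal row st.1)) (0, 0)).2)))) := by
    unfold solution
    exact maxFold _ _ 0
  have hmem : ∀ p ∈ permsA (ability.headI).length ability,
      some (((p.foldl (fun (st : Nat × Int) row =>
          (st.1 + 1, st.2 + pvVal row st.1)) (0, 0)).2)) =
        some (sumZip p (List.range (ability.headI).length)) := by
    intro p hp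
    rw [idxFold p 0 0]
    rw [permsA_mem_length _ ability p hp, ← List.range_eq_range']
    norm_num
  rw [hA, List.map_congr_left hmem]
  have hfus := fusion (List.range (ability.headI).length) ability
  rw [List.length_range] at hfus
  rw [← hfus, Hbest_eq_Gbest]
  show oget 0 (Gbest ability (List.range ability.headI.length)) =
    (match (List.foldl (pvStepRow ability.headI.length)
        ((List.range (2 ^ ability.headI.length)).map (fun m => if m = 0 then some 0 else none))
        ability.reverse).getD (2 ^ ability.headI.length - 1) none with
      | none => 0
      | some best => if best > 0 then best else 0)
  rw [List.foldl_reverse]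
  have hinv := dp_invariant (ability.headI).length ability
  rw [hinv.2 (2 ^ (ability.headI).length - 1)
    (by have := Nat.two_pow_pos (ability.headI).length; omega), evs_full]
  cases Gbest ability (List.range (ability.headI).length) with
  | none => rfl
  | some v =>
    show max 0 v = if v > 0 then v else 0
    rw [max_def]
    split_ifs <;> omega

-- ===== VERDICT (by name: the statement is the Claim_ definition above) =====
theorem solution_spec : Claim_equal_solution := by
  intro ability _ _
  unfold Spec_solution
  exact solution_eq ability
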